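-- pv_equiv track=rewrite | github.com/tomasnyberg/cp_notebook | codeforces/1400/1427B.py | score_arr
-- ===== SOURCE A (Python) =====
-- def score_arr(s):
--     inarow = 0
--     score = [0]*len(s)
--     for idx, c in enumerate(s):
--         if c == 'W':
--             score[idx] = 2 if inarow >= 1 else 1
--             inarow+=1
--         else:
--             inarow = 0
--     return score
-- ===== SOURCE B (Python) =====
-- from itertools import groupby
--
-- def score_arr(s):
--     res = []
--     for is_w, grp in groupby(s, key=lambda c: c == 'W'):
--         n = sum(1 for _ in grp)
--         if is_w:
--             res += [1] + [2] * (n - 1)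
--         else:
--             res += [0] * n
--     return res
-- ===== Notes on version B (the rewrite author's own statement) =====
-- stated objective: alternative
-- what changed: Replaces the stateful per-character running-streak counter that writes into a preallocated array with a run-length traversal via itertools.groupby: each maximal run of 'W' contributes 1 followed by 2s, each other run contributes 0s, concatenated.
import Mathlib
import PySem

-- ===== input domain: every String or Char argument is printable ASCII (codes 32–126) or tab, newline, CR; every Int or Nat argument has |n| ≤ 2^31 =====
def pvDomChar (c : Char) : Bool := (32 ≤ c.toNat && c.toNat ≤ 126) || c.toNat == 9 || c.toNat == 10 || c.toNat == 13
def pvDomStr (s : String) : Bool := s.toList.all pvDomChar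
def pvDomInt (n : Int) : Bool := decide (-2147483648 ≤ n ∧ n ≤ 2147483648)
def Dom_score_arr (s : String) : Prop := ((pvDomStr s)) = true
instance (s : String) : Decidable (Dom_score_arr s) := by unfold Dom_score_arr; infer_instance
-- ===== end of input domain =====

-- B replaces A's stateful running-streak counter by a run-length (groupby) traversal; objective: alternative decomposition, same cost.

-- ===== PORT A =====
-- transliteration of A: inarow counter, preallocated score list, enumerate loop with in-place set
def score_arr (s : String) : List Int :=
  ((PySem.List.enumerate s.toList 0).foldl
    (fun (st : Int × List Int) (p : Int × Char) =>
      if p.2 == 'W' then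
        (st.1 + 1, PySem.List.pySetD st.2 p.1 (if st.1 ≥ 1 then (2 : Int) else 1))
      else
        (0, st.2))
    (0, PySem.List.pyRepeat [(0 : Int)] (s.toList.length : Int))).2

-- ===== PORT B =====
-- transliteration of B: walk maximal runs of equal key (c == 'W'), emit each run's block
def score_arr_altGo (l : List Char) : List Int :=
  match l with
  | [] => []
  | c :: rest =>
    let run := rest.takeWhile (fun d => (d == 'W') == (c == 'W'))
    (if c == 'W' then (1 : Int) :: List.replicate run.length 2
     else List.replicate (run.length + 1) 0)
    ++ score_arr_altGo (rest.dropWhile (fun d => (d == 'W') == (c == 'W')))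
termination_by l.length
decreasing_by
  simp only [List.length_cons]
  exact Nat.lt_succ_of_le (List.length_dropWhile_le _ _)

def score_arr_alt (s : String) : List Int := score_arr_altGo s.toList

-- ===== PRECONDITION & SPEC =====
def Spec_score_arr (s : String) (out : List Int) : Prop := out = score_arr_alt s
instance (s : String) (out : List Int) : Decidable (Spec_score_arr s out) := by unfold Spec_score_arr; infer_instance

-- ===== CLAIM (what is proved, stated in full; the proofs are below) =====
def Claim_equal_score_arr : Prop := ∀ (s : String), Dom_score_arr s → Spec_score_arr s (score_arr s)

-- ===== LEMMAS AND PROOFS =====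

-- common specification: one value per character, carrying whether the previous char was 'W'
def gSpec (prev : Bool) : List Char → List Int
  | [] => []
  | c :: t => (if c == 'W' then (if prev then 2 else 1) else 0) :: gSpec (c == 'W') t

-- A's loop, generalized over the processed prefix and counter
theorem score_arr_loopA (l : List Char) : ∀ (pre : List Int) (inarow : Int), 0 ≤ inarow →
    ((PySem.List.enumerate l (pre.length : Int)).foldl
      (fun (st : Int × List Int) (p : Int × Char) =>
        if p.2 == 'W' then
          (st.1 + 1, PySem.List.pySetD st.2 p.1 (if st.1 ≥ 1 then (2 : Int) else 1))
        else
          (0, st.2))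
      (inarow, pre ++ List.replicate l.length 0)).2
    = pre ++ gSpec (decide (1 ≤ inarow)) l := by
  induction l with
  | nil => intro pre inarow h; simp [PySem.List.enumerate, gSpec]
  | cons c t ih =>
    intro pre inarow h
    rw [PySem.List.enumerate_cons, List.foldl_cons]
    by_cases hc : c == 'W'
    · simp only [hc, if_true]
      have hset : PySem.List.pySetD (pre ++ List.replicate (c :: t).length 0)
          ((pre.length : Int)) (if inarow ≥ 1 then (2 : Int) else 1)
          = (pre ++ [if inarow ≥ 1 then (2 : Int) else 1]) ++ List.replicate t.length 0 := by
        rw [PySem.List.pySetD_natCast]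
        simp [List.replicate_succ]
      have hlen : ((pre.length : Int) + 1) = (((pre ++ [if inarow ≥ 1 then (2 : Int) else 1]).length : Int)) := by
        simp
      rw [hset, hlen, ih _ (inarow + 1) (by omega)]
      have h1 : decide (1 ≤ inarow + 1) = true := by simp; omega
      simp only [gSpec, hc, if_true, h1, List.append_assoc, List.cons_append, List.nil_append]
      simp [ge_iff_le]
    · have hc' : (c == 'W') = false := by simpa using hc
      simp only [hc', Bool.false_eq_true, if_false]
      have : pre ++ List.replicate (c :: t).length 0
          = (pre ++ [(0 : Int)]) ++ List.replicate t.length 0 := by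
        simp [List.replicate_succ]
      rw [this]
      have hlen : ((pre.length : Int) + 1) = (((pre ++ [(0 : Int)]).length : Int)) := by simp
      rw [hlen, ih _ 0 le_rfl]
      simp only [gSpec, hc', Bool.false_eq_true, if_false, List.append_assoc,
        List.cons_append, List.nil_append]
      simp

theorem score_arr_eq_gSpec (s : String) : score_arr s = gSpec false s.toList := by
  unfold score_arr
  rw [PySem.List.pyRepeat_singleton]
  have := score_arr_loopA s.toList [] 0 le_rfl
  simpa using this

-- a run of 'W's under prev = true yields 2s
theorem gSpec_run_W (run : List Char) (r : List Char) (h : ∀ d ∈ run, d = 'W') :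
    gSpec true (run ++ r) = List.replicate run.length 2 ++ gSpec true r := by
  induction run with
  | nil => simp
  | cons d t ih =>
    have hd : d = 'W' := h d (by simp)
    simp only [List.cons_append, gSpec, hd, beq_self_eq_true, if_true]
    rw [ih (fun x hx => h x (by simp [hx]))]
    simp [List.replicate_succ]

-- a run of non-'W's under prev = false yields 0s
theorem gSpec_run_L (run : List Char) (r : List Char) (h : ∀ d ∈ run, d ≠ 'W') :
    gSpec false (run ++ r) = List.replicate run.length 0 ++ gSpec false r := by
  induction run with
  | nil => simp
  | cons d t ih =>
    have hd : d ≠ 'W' := h d (by simp)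
    simp only [List.cons_append, gSpec]
    rw [if_neg (by simp [hd]), show (d == 'W') = false from by simp [hd],
      ih (fun x hx => h x (by simp [hx]))]
    simp [List.replicate_succ]

-- gSpec ignores prev when the list is empty or starts with a non-'W'
theorem gSpec_indep (b b' : Bool) (r : List Char)
    (h : ∀ d t, r = d :: t → d ≠ 'W') : gSpec b r = gSpec b' r := by
  cases r with
  | nil => rfl
  | cons d t =>
    have hd : d ≠ 'W' := h d t rfl
    simp [gSpec, hd]

theorem gSpec_cons (prev : Bool) (c : Char) (t : List Char) :
    gSpec prev (c :: t) = (if c == 'W' then (if prev then 2 else 1) else 0) :: gSpec (c == 'W') t := rfl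

theorem score_arr_altGo_eq (l : List Char) : score_arr_altGo l = gSpec false l := by
  induction l using score_arr_altGo.induct with
  | case1 => simp [score_arr_altGo, gSpec]
  | case2 c rest ih =>
    rw [score_arr_altGo, ih]
    have hsplit := (List.takeWhile_append_dropWhile
      (p := fun d => (d == 'W') == (c == 'W')) (l := rest)).symm
    have hdropne : ∀ d t, rest.dropWhile (fun d => (d == 'W') == (c == 'W')) = d :: t →
        ((d == 'W') == (c == 'W')) = false := by
      intro d t hdt
      have h2 := List.head?_dropWhile_not (p := fun d => (d == 'W') == (c == 'W')) (l := rest)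
      rw [hdt] at h2; simpa using h2
    by_cases hc : (c == 'W') = true
    · have htake : ∀ d ∈ rest.takeWhile (fun d => (d == 'W') == (c == 'W')), d = 'W' := by
        intro d hd
        have h3 := List.mem_takeWhile_imp hd
        rw [hc] at h3; simpa using h3
      have hrest' : ∀ d t, rest.dropWhile (fun d => (d == 'W') == (c == 'W')) = d :: t → d ≠ 'W' := by
        intro d t hdt hdw
        have h4 := hdropne d t hdt
        rw [hc, hdw] at h4; simp at h4
      rw [if_pos hc, gSpec_cons, hc, if_pos rfl]
      conv_rhs => rw [hsplit]
      rw [gSpec_run_W _ _ htake, gSpec_indep true false _ hrest']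
      simp [hc]
    · have hc' : (c == 'W') = false := by simpa using hc
      have htake : ∀ d ∈ rest.takeWhile (fun d => (d == 'W') == (c == 'W')), d ≠ 'W' := by
        intro d hd hdw
        have h3 := List.mem_takeWhile_imp hd
        rw [hc', hdw] at h3; simp at h3
      rw [if_neg hc, gSpec_cons, hc', if_neg (by simp)]
      conv_rhs => rw [hsplit]
      rw [gSpec_run_L _ _ htake]
      simp [hc', List.replicate_succ]

-- ===== VERDICT (by name: the statement is the Claim_ definition above) =====
theorem score_arr_spec : Claim_equal_score_arr := by
  intro s _
  unfold Spec_score_arr score_arr_alt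
  rw [score_arr_eq_gSpec, score_arr_altGo_eq]
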